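-- pv_equiv track=rewrite | github.com/Bl4ck-C4t/Math | NOC.py | diff2
-- ===== SOURCE A (Python) =====
-- def differ(ls,ls2):
--     ls3 = []
--     ls2 = list(tuple(ls2))
--     for x in ls:
--         if x in ls2:
--             ls2.remove(x)
--         ls3.append(x)
--     return ls3 + ls2
--
-- def diff2(ls):
--     while len(ls) != 1:
--         c = differ(ls[0],ls[1])
--         del ls[0]
--         del ls[0]
--         ls.insert(0,1)
--         ls[0] = c
--     return ls[0]
-- ===== SOURCE B (Python) =====
-- def diff2(ls):
--     # thr[v] = number of occurrences of v already emitted to out.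
--     # An occurrence of x with per-list occurrence index j is emitted iff j >= thr[x]
--     # (i.e. this list is the first one containing at least j+1 copies of x),
--     # and thr[x] is bumped to j+1 at that moment.
--     thr = {}
--     out = []
--     for sub in ls:
--         seen = {}
--         for x in sub:
--             j = seen.get(x, 0)
--             seen[x] = j + 1
--             if j >= thr.get(x, 0):
--                 out.append(x)
--                 thr[x] = j + 1
--     return out
-- ===== Notes on version B (the rewrite author's own statement) =====
-- stated objective: faster
-- what changed: A folds with an accumulator and a mutable remainder list scanned by in/remove per element; B never forms per-step remainders: it classifies each occurrence independently in one linear pass, emitting x iff its per-list occurrence index reaches thr[x], the running count of x already emitted, bumping thr[x] on emission.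
-- outside the precondition, e.g. on diff2([]): A raises IndexError, B returns []
import Mathlib
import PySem

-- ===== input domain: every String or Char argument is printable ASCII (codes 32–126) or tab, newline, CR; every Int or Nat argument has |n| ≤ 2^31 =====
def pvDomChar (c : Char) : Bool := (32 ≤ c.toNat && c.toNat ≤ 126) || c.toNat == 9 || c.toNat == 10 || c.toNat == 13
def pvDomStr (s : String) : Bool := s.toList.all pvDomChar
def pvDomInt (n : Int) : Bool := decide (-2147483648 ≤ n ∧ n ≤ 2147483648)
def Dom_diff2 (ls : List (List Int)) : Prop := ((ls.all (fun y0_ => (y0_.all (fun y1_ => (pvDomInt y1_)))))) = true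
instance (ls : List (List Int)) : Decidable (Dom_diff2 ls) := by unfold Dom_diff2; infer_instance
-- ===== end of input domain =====

-- B drops A's accumulator/remainder fold entirely: each occurrence is classified on its own
-- (emit x iff its per-list occurrence index reaches the running emitted-count threshold thr[x]),
-- one linear pass over the input (objective: faster, asymptotic).
-- Python A mutates its argument list in place (del/insert); the equivalence proved here is
-- about the RETURN value only.

-- ===== PORT A =====
-- differ: for x in ls: if x in ls2: ls2.remove(x); ls3.append(x); return ls3 + ls2
def differ (ls ls2 : List Int) : List Int :=
  let r := ls.foldl (fun (st : List Int × List Int) x =>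
    let ls2' := if st.2.contains x then (PySem.List.remove? st.2 x).getD st.2 else st.2
    (st.1 ++ [x], ls2')) ([], ls2)
  r.1 ++ r.2

-- while len(ls) != 1: replace the first two elements by differ of them.
-- (On ls = [] the Python A raises IndexError on ls[0]; Pre_diff2 excludes that input.)
def diff2 (ls : List (List Int)) : List Int :=
  match ls with
  | [] => []
  | [x] => x
  | a :: b :: rest => diff2 (differ a b :: rest)
  termination_by ls.length

-- ===== PORT B =====
-- inner loop body: j = seen.get(x,0); seen[x] = j+1; if j >= thr.get(x,0): out.append(x); thr[x] = j+1
def innerStep (st2 : PySem.Dict Int Int × PySem.Dict Int Int × List Int) (x : Int) :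
    PySem.Dict Int Int × PySem.Dict Int Int × List Int :=
  let j := st2.1.getD x 0
  let seen' := st2.1.insert x (j + 1)
  if j ≥ st2.2.1.getD x 0 then
    (seen', st2.2.1.insert x (j + 1), st2.2.2 ++ [x])
  else
    (seen', st2.2.1, st2.2.2)

-- outer loop body: seen = {}; for x in sub: …  (state carried across lists: (thr, out))
def outerStep (st : PySem.Dict Int Int × List Int) (sub : List Int) :
    PySem.Dict Int Int × List Int :=
  (sub.foldl innerStep (PySem.Dict.empty, st.1, st.2)).2

def diff2_alt (ls : List (List Int)) : List Int :=
  (ls.foldl outerStep (PySem.Dict.empty, [])).2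

-- ===== PRECONDITION & SPEC =====
-- Pre_ excludes only ls = []: there Python A raises IndexError (ls[0]).
def Pre_diff2 (ls : List (List Int)) : Prop := ls ≠ []
instance (ls : List (List Int)) : Decidable (Pre_diff2 ls) := by unfold Pre_diff2; infer_instance
def pvWitness_diff2 : List (List Int) := [[1, 2, 2], [2, 3]]

def Spec_diff2 (ls : List (List Int)) (out : List Int) : Prop := out = diff2_alt ls
instance (ls : List (List Int)) (out : List Int) : Decidable (Spec_diff2 ls out) := by unfold Spec_diff2; infer_instance

-- ===== CLAIM (what is proved, stated in full; the proofs are below) =====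
def Claim_equal_diff2 : Prop := ∀ (ls : List (List Int)), Dom_diff2 ls → Pre_diff2 ls → Spec_diff2 ls (diff2 ls)

-- ===== LEMMAS AND PROOFS =====

-- A's inner loop on ls2, extracted: iterated guarded first-occurrence removal.
def remAll (A L : List Int) : List Int :=
  A.foldl (fun L x => if L.contains x then (PySem.List.remove? L x).getD L else L) L

-- budget-filter: pop one from f x while positive, else keep x.
def filterF (f : Int → Int) : List Int → List Int
  | [] => []
  | x :: L => if f x > 0 then filterF (fun v => if v = x then f x - 1 else f v) L
              else x :: filterF f L

theorem differ_eq_remAll (a b : List Int) : differ a b = a ++ remAll a b := by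
  suffices h : ∀ (A : List Int) (p L : List Int),
      A.foldl (fun (st : List Int × List Int) x =>
        ((st.1 ++ [x]), if st.2.contains x then (PySem.List.remove? st.2 x).getD st.2 else st.2))
        (p, L) = (p ++ A, remAll A L) by
    have := h a [] b
    simp [differ, remAll] at *
    simpa using congrArg (fun r => r.1 ++ r.2) this
  intro A
  induction A with
  | nil => intro p L; simp [remAll]
  | cons x A ih =>
      intro p L
      simp only [List.foldl_cons, remAll, ih]
      simp

theorem filterF_congr (L : List Int) : ∀ (f g : Int → Int), (∀ v, f v = g v) →
    filterF f L = filterF g L := by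
  induction L with
  | nil => intro f g h; rfl
  | cons x L ih =>
      intro f g h
      simp only [filterF, h x]
      split_ifs with hx
      · exact ih _ _ (fun v => by by_cases hv : v = x <;> simp [hv, h])
      · rw [ih _ _ h]

theorem filterF_nonpos (L : List Int) : ∀ (f : Int → Int), (∀ v, f v ≤ 0) →
    filterF f L = L := by
  induction L with
  | nil => intro f h; rfl
  | cons x L ih =>
      intro f h
      have : ¬ f x > 0 := by have := h x; omega
      simp [filterF, this, ih f h]

-- filterF only ever compares with 0, so it cannot tell two budgets apart that
-- agree where positive and are both exhausted elsewhere.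
theorem filterF_rel (L : List Int) : ∀ (f g : Int → Int),
    (∀ v, f v = g v ∨ (f v ≤ 0 ∧ g v ≤ 0)) → filterF f L = filterF g L := by
  induction L with
  | nil => intro f g h; rfl
  | cons x L ih =>
      intro f g h
      rcases h x with hx | hx
      · simp only [filterF, hx]
        split_ifs with hp
        · exact ih _ _ (fun v => by
            by_cases hv : v = x
            · subst hv; left; simp [hx]
            · simpa [hv] using h v)
        · rw [ih _ _ h]
      · have h1 : ¬ f x > 0 := by omega
        have h2 : ¬ g x > 0 := by omega
        simp only [filterF, if_neg h1, if_neg h2]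
        rw [ih _ _ h]

-- the core exchange lemma: bumping the count of x equals erasing the first x from L.
theorem filterF_bump (x : Int) (L : List Int) : ∀ (f : Int → Int), (∀ v, 0 ≤ f v) →
    filterF (fun v => if v = x then f x + 1 else f v) L = filterF f (L.erase x) := by
  induction L with
  | nil => intro f hf; rfl
  | cons y L ih =>
      intro f hf
      by_cases hyx : y = x
      · subst hyx
        have hpos : f y + 1 > 0 := by have := hf y; omega
        simp only [filterF, List.erase_cons_head]
        rw [if_pos (by simpa using hpos)]
        exact filterF_congr L _ _ (fun v => by by_cases hv : v = y <;> simp [hv])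
      · have herase : (y :: L).erase x = y :: L.erase x := by
          rw [List.erase_cons_tail]
          simp [hyx]
        simp only [filterF, if_neg hyx, herase]
        by_cases hy : f y > 0
        · simp only [if_pos hy]
          have hxy : ¬ x = y := fun h => hyx h.symm
          have := ih (fun v => if v = y then f y - 1 else f v)
            (fun v => by have := hf v; by_cases hv : v = y <;> simp [hv] <;> omega)
          rw [← this]
          exact filterF_congr L _ _ (fun v => by
            by_cases hv1 : v = y
            · subst hv1; simp [hyx]
            · by_cases hv2 : v = x <;> simp [hv1, hv2, hxy])
        · simp only [if_neg hy]
          rw [ih f hf]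

theorem remAll_eq_filterF (A : List Int) : ∀ (L : List Int),
    remAll A L = filterF (fun v => (A.count v : Int)) L := by
  induction A with
  | nil =>
      intro L
      rw [filterF_nonpos L _ (fun v => by simp)]
      rfl
  | cons x A ih =>
      intro L
      have hstep : remAll (x :: A) L = remAll A (L.erase x) := by
        simp only [remAll, List.foldl_cons]
        congr 1
        by_cases hx : L.contains x
        · rw [if_pos hx]
          rw [PySem.List.remove?_eq_some_erase L x (by simpa using hx)]
          rfl
        · rw [if_neg hx]
          rw [List.erase_of_not_mem (by simpa using hx)]
      rw [hstep, ih]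
      rw [← filterF_bump x L _ (fun v => by positivity)]
      exact filterF_congr L _ _ (fun v => by
        by_cases hv : v = x
        · simp [hv]
        · simp [hv, Ne.symm hv])

-- pure model of B's inner loop: s = per-list occurrence counts so far, t = thresholds.
def innerOut (s t : Int → Int) : List Int → List Int
  | [] => []
  | x :: L => if s x ≥ t x then
                x :: innerOut (fun v => if v = x then s x + 1 else s v)
                              (fun v => if v = x then s x + 1 else t v) L
              else innerOut (fun v => if v = x then s x + 1 else s v) t L

def innerT (s t : Int → Int) : List Int → (Int → Int)
  | [] => t
  | x :: L => if s x ≥ t x then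
                innerT (fun v => if v = x then s x + 1 else s v)
                       (fun v => if v = x then s x + 1 else t v) L
              else innerT (fun v => if v = x then s x + 1 else s v) t L

theorem inner_fold_spec (L : List Int) : ∀ (seen thr : PySem.Dict Int Int) (out : List Int),
    (L.foldl innerStep (seen, thr, out)).2.2
        = out ++ innerOut (fun v => seen.getD v 0) (fun v => thr.getD v 0) L
    ∧ ∀ v, (L.foldl innerStep (seen, thr, out)).2.1.getD v 0
        = innerT (fun v => seen.getD v 0) (fun v => thr.getD v 0) L v := by
  induction L with
  | nil => intro seen thr out; simp [innerOut, innerT]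
  | cons x L ih =>
      intro seen thr out
      by_cases hx : seen.getD x 0 ≥ thr.getD x 0
      · have hstep : innerStep (seen, thr, out) x
            = (seen.insert x (seen.getD x 0 + 1), thr.insert x (seen.getD x 0 + 1), out ++ [x]) := by
          simp [innerStep, hx]
        have hs : (fun v => (seen.insert x (seen.getD x 0 + 1)).getD v 0)
            = (fun v => if v = x then seen.getD x 0 + 1 else seen.getD v 0) :=
          funext (fun v => by simp [PySem.Dict.getD_insert])
        have ht : (fun v => (thr.insert x (seen.getD x 0 + 1)).getD v 0)
            = (fun v => if v = x then seen.getD x 0 + 1 else thr.getD v 0) :=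
          funext (fun v => by simp [PySem.Dict.getD_insert])
        obtain ⟨ho, hv⟩ := ih (seen.insert x (seen.getD x 0 + 1))
          (thr.insert x (seen.getD x 0 + 1)) (out ++ [x])
        constructor
        · rw [List.foldl_cons, hstep, ho, hs, ht]
          simp [innerOut, hx]
        · intro v
          rw [List.foldl_cons, hstep, hv v, hs, ht]
          simp [innerT, hx]
      · have hstep : innerStep (seen, thr, out) x
            = (seen.insert x (seen.getD x 0 + 1), thr, out) := by
          simp [innerStep, hx]
        have hs : (fun v => (seen.insert x (seen.getD x 0 + 1)).getD v 0)
            = (fun v => if v = x then seen.getD x 0 + 1 else seen.getD v 0) :=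
          funext (fun v => by simp [PySem.Dict.getD_insert])
        obtain ⟨ho, hv⟩ := ih (seen.insert x (seen.getD x 0 + 1)) thr out
        constructor
        · rw [List.foldl_cons, hstep, ho, hs]
          simp [innerOut, hx]
        · intro v
          rw [List.foldl_cons, hstep, hv v, hs]
          simp [innerT, hx]

theorem innerOut_eq_filterF (L : List Int) : ∀ (s t : Int → Int),
    innerOut s t L = filterF (fun v => t v - s v) L := by
  induction L with
  | nil => intro s t; rfl
  | cons x L ih =>
      intro s t
      by_cases hx : s x ≥ t x
      · have hnp : ¬ (t x - s x > 0) := by omega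
        simp only [innerOut, if_pos hx, filterF, if_neg hnp]
        rw [ih]
        refine congrArg (x :: ·) ?_
        refine filterF_rel L _ _ (fun v => ?_)
        by_cases hv : v = x
        · subst hv; right; constructor <;> simp <;> omega
        · left; simp [hv]
      · have hp : t x - s x > 0 := by omega
        simp only [innerOut, if_neg hx, filterF, if_pos hp]
        rw [ih]
        refine filterF_congr L _ _ (fun v => ?_)
        by_cases hv : v = x <;> simp [hv] <;> omega

theorem innerT_spec (L : List Int) : ∀ (s t : Int → Int), (∀ v, s v ≤ t v) →
    ∀ v, innerT s t L v = max (t v) (s v + (L.count v : Int)) := by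
  induction L with
  | nil =>
      intro s t h v
      have := h v
      simp [innerT]
      omega
  | cons x L ih =>
      intro s t h v
      have hcount : ((x :: L).count v : Int) = (L.count v : Int) + (if v = x then 1 else 0) := by
        by_cases hv : v = x <;> simp [hv, List.count_cons] <;> omega
      by_cases hx : s x ≥ t x
      · have hsx : s x = t x := le_antisymm (h x) hx
        simp only [innerT, if_pos hx]
        rw [ih _ _ (fun w => by by_cases hw : w = x <;> simp [hw] <;> exact h w) v]
        by_cases hv : v = x
        · subst hv
          have hc : (0 : Int) ≤ (L.count v : Int) := by positivity
          simp [hcount, hsx]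
          omega
        · have := h v
          simp [hv, hcount]
      · simp only [innerT, if_neg hx]
        have hsx : s x + 1 ≤ t x := by omega
        rw [ih _ t (fun w => by by_cases hw : w = x <;> simp [hw] <;> [exact hsx; exact h w]) v]
        by_cases hv : v = x
        · subst hv; simp [hcount]; omega
        · simp [hv, hcount]

theorem filterF_count (L : List Int) : ∀ (f : Int → Int) (v : Int),
    ((filterF f L).count v : Int) = (L.count v : Int) - min (L.count v : Int) (max (f v) 0) := by
  induction L with
  | nil => intro f v; simp [filterF]
  | cons x L ih =>
      intro f v
      have hcount : ((x :: L).count v : Int) = (L.count v : Int) + (if v = x then 1 else 0) := by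
        by_cases hv : v = x <;> simp [hv, List.count_cons] <;> omega
      by_cases hp : f x > 0
      · simp only [filterF, if_pos hp]
        rw [ih]
        by_cases hv : v = x
        · subst hv; simp [hcount]; omega
        · simp [hv, hcount]
      · simp only [filterF, if_neg hp]
        have hx : ((x :: filterF f L).count v : Int)
            = ((filterF f L).count v : Int) + (if v = x then 1 else 0) := by
          by_cases hv : v = x <;> simp [hv, List.count_cons] <;> omega
        rw [hx, ih]
        by_cases hv : v = x
        · subst hv; simp [hcount]; omega
        · simp [hv, hcount]

theorem differ_count (a b : List Int) (v : Int) :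
    ((differ a b).count v : Int) = max (a.count v : Int) (b.count v : Int) := by
  rw [differ_eq_remAll, remAll_eq_filterF]
  have : ((a ++ filterF (fun v => (a.count v : Int)) b).count v : Int)
      = (a.count v : Int) + ((filterF (fun v => (a.count v : Int)) b).count v : Int) := by
    simp [List.count_append]
  rw [this, filterF_count]
  have h1 : (0 : Int) ≤ (a.count v : Int) := by positivity
  have h2 : (0 : Int) ≤ (b.count v : Int) := by positivity
  omega

theorem outer_spec (rest : List (List Int)) : ∀ (thr : PySem.Dict Int Int) (acc : List Int),
    (∀ v, thr.getD v 0 = (acc.count v : Int)) →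
    (rest.foldl outerStep (thr, acc)).2 = rest.foldl differ acc := by
  induction rest with
  | nil => intro thr acc h; rfl
  | cons sub rest ih =>
      intro thr acc h
      obtain ⟨ho, hv⟩ := inner_fold_spec sub PySem.Dict.empty thr acc
      have hstep : outerStep (thr, acc) sub
          = ((sub.foldl innerStep (PySem.Dict.empty, thr, acc)).2.1,
             acc ++ innerOut (fun v => PySem.Dict.empty.getD v 0) (fun v => thr.getD v 0) sub) := by
        simp only [outerStep]
        exact Prod.ext rfl ho
      have hout : acc ++ innerOut (fun v => PySem.Dict.empty.getD v 0) (fun v => thr.getD v 0) sub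
          = differ acc sub := by
        rw [innerOut_eq_filterF, differ_eq_remAll, remAll_eq_filterF]
        refine congrArg (acc ++ ·) (filterF_congr sub _ _ (fun v => ?_))
        simp [PySem.Dict.getD_empty, h v]
      rw [List.foldl_cons, hstep, hout, List.foldl_cons]
      refine ih _ _ (fun v => ?_)
      rw [hv v, innerT_spec sub _ _ (fun w => by simp [PySem.Dict.getD_empty, h w]) v]
      rw [differ_count]
      simp [PySem.Dict.getD_empty, h v]

theorem diff2_eq_foldl_differ (rest : List (List Int)) : ∀ (a : List Int),
    diff2 (a :: rest) = rest.foldl differ a := by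
  induction rest with
  | nil => intro a; simp [diff2]
  | cons b rest ih =>
      intro a
      rw [show diff2 (a :: b :: rest) = diff2 (differ a b :: rest) by simp [diff2],
        ih (differ a b), List.foldl_cons]

theorem differ_nil (b : List Int) : differ [] b = b := by
  simp [differ]

-- ===== VERDICT (by name: the statement is the Claim_ definition above) =====
theorem diff2_spec : Claim_equal_diff2 := by
  intro ls _ hpre
  unfold Spec_diff2
  match ls with
  | [] => exact absurd rfl hpre
  | a :: rest =>
      rw [diff2_eq_foldl_differ]
      unfold diff2_alt
      rw [outer_spec (a :: rest) PySem.Dict.empty []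
        (fun v => by simp [PySem.Dict.getD_empty])]
      rw [List.foldl_cons, differ_nil]
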